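-- pv_equiv track=rewrite | github.com/wangziyannb/Fast-dLLM | v2/eval.py | _fixed_plan_for_len
-- ===== SOURCE A (Python) =====
-- from typing import OrderedDict, Tuple, List, Optional, Sequence, Dict, Any
--
-- def _fixed_plan_for_len(length: int, block_size: int) -> List[int]:
--     if length <= 0:
--         return []
--     plan = []
--     remaining = length
--     while remaining > 0:
--         take = min(block_size, remaining)
--         plan.append(int(take))
--         remaining -= take
--     return plan
-- ===== SOURCE B (Python) =====
-- from typing import List
--
-- def _fixed_plan_for_len(length: int, block_size: int) -> List[int]:
--     if length <= 0:
--         return []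
--     full, rem = divmod(length, block_size)
--     return [block_size] * full + ([rem] if rem else [])
-- ===== Notes on version B (the rewrite author's own statement) =====
-- stated objective: simpler
-- what changed: Replaces the subtractive while-loop with a closed-form divmod: [block_size]*full plus a final remainder chunk.
import Mathlib
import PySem

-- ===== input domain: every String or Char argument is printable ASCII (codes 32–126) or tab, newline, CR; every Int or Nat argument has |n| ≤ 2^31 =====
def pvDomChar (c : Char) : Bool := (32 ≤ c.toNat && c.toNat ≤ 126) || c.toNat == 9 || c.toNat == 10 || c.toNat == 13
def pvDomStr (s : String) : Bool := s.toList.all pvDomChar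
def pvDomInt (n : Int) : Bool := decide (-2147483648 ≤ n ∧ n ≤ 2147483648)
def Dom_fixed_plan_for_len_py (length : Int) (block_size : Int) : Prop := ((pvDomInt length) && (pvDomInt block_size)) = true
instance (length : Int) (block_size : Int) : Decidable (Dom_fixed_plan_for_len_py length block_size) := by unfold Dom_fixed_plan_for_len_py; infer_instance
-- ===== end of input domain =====

-- ===== PORT A =====
-- A's while-loop, transliterated with a fuel guard (fuel = length.toNat makes the
-- recursion total; with 0 < block_size it never runs out, matching the Python loop).
def pvLoopA (block_size : Int) : Nat → Int → List Int
  | 0, _ => []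
  | fuel + 1, remaining =>
    if remaining > 0 then
      let take := min block_size remaining
      take :: pvLoopA block_size fuel (remaining - take)
    else []

def fixed_plan_for_len_py (length : Int) (block_size : Int) : List Int :=
  if length ≤ 0 then []
  else pvLoopA block_size length.toNat length

-- ===== PORT B =====
-- B: closed form via divmod.
def fixed_plan_for_len_py_alt (length : Int) (block_size : Int) : List Int :=
  if length ≤ 0 then []
  else
    let full := PySem.Int.floordiv length block_size
    let rem := PySem.Int.mod length block_size
    List.replicate full.toNat block_size ++ (if rem ≠ 0 then [rem] else [])

-- ===== PRECONDITION & SPEC =====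
-- Pre_ excludes only inputs on which A never returns: with length > 0 and
-- block_size ≤ 0 the Python while-loop runs forever.
def Pre_fixed_plan_for_len_py (length : Int) (block_size : Int) : Prop :=
  length ≤ 0 ∨ 0 < block_size
instance (length : Int) (block_size : Int) : Decidable (Pre_fixed_plan_for_len_py length block_size) := by
  unfold Pre_fixed_plan_for_len_py; infer_instance

def pvWitness_fixed_plan_for_len_py : Int × Int := (7, 3)

def Spec_fixed_plan_for_len_py (length : Int) (block_size : Int) (out : List Int) : Prop := out = fixed_plan_for_len_py_alt length block_size
instance (length : Int) (block_size : Int) (out : List Int) : Decidable (Spec_fixed_plan_for_len_py length block_size out) := by unfold Spec_fixed_plan_for_len_py; infer_instance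

-- ===== CLAIM (what is proved, stated in full; the proofs are below) =====
def Claim_equal_fixed_plan_for_len_py : Prop := ∀ (length : Int) (block_size : Int), Dom_fixed_plan_for_len_py length block_size → Pre_fixed_plan_for_len_py length block_size → Spec_fixed_plan_for_len_py length block_size (fixed_plan_for_len_py length block_size)

-- ===== LEMMAS AND PROOFS =====

theorem pvLoopA_of_nonpos (block_size : Int) (fuel : Nat) (r : Int) (h : ¬ r > 0) :
    pvLoopA block_size fuel r = [] := by
  cases fuel <;> simp [pvLoopA, h]

theorem pvLoopA_closed (block_size : Int) (hb : 0 < block_size) :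
    ∀ (fuel : Nat) (remaining : Int), 0 < remaining → remaining.toNat ≤ fuel →
    pvLoopA block_size fuel remaining =
      List.replicate ((remaining / block_size)).toNat block_size ++
        (if (remaining % block_size) ≠ 0 then [(remaining % block_size)] else []) := by
  intro fuel
  induction fuel with
  | zero => intro r hr hf; omega
  | succ fuel ih =>
    intro r hr hf
    simp only [pvLoopA, if_pos hr]
    by_cases hle : r ≤ block_size
    · rw [min_eq_right hle, sub_self, pvLoopA_of_nonpos block_size fuel 0 (by omega)]
      by_cases heq : r = block_size
      · subst heq
        rw [Int.ediv_self (by omega), Int.emod_self]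
        simp
      · have hlt : r < block_size := lt_of_le_of_ne hle heq
        rw [Int.ediv_eq_zero_of_lt (le_of_lt hr) hlt,
            Int.emod_eq_of_lt (le_of_lt hr) hlt]
        simp only [Int.toNat_zero, List.replicate_zero, List.nil_append]
        rw [if_pos (by omega : r ≠ 0)]
    · rw [not_le] at hle
      rw [min_eq_left (le_of_lt hle)]
      rw [ih (r - block_size) (by omega) (by omega)]
      have hdiv : ((r - block_size) / block_size) = (r / block_size) - 1 := by
        have := Int.add_mul_ediv_right r (-1) (by omega : block_size ≠ 0)
        simpa [sub_eq_add_neg, neg_mul] using this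
      have hmod : ((r - block_size) % block_size) = (r % block_size) :=
        Int.sub_emod_right r block_size
      rw [hdiv, hmod]
      have hq : 0 < (r / block_size) := by
        have h1 := Int.ediv_le_ediv hb (le_of_lt hle)
        rw [Int.ediv_self (by omega)] at h1
        have h2 : r / block_size = (r / block_size) := rfl
        omega
      have hq2 : ((r / block_size)).toNat = (((r / block_size) - 1).toNat) + 1 := by omega
      rw [hq2, List.replicate_succ, List.cons_append]

-- ===== VERDICT (by name: the statement is the Claim_ definition above) =====
theorem fixed_plan_for_len_py_spec : Claim_equal_fixed_plan_for_len_py := by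
  intro length block_size _ hpre
  unfold Spec_fixed_plan_for_len_py fixed_plan_for_len_py fixed_plan_for_len_py_alt
  by_cases hl : length ≤ 0
  · simp [hl]
  · rw [not_le] at hl
    have hb : 0 < block_size := by
      rcases hpre with h | h
      · omega
      · exact h
    rw [if_neg (by omega), if_neg (by omega)]
    rw [PySem.Int.floordiv_eq_ediv_of_pos hb, PySem.Int.mod_eq_emod_of_pos hb]
    exact pvLoopA_closed block_size hb length.toNat length hl (by omega)
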